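-- pv_equiv track=rewrite | github.com/riyanhax/Control_Venta_Jugos | angelica/ejercicio_95.py | calMenores
-- ===== SOURCE A (Python) =====
-- def calMenores(lista):
--     cont = [0,0]
--     for i in range(0, len(lista)):
--         if lista[i][1] < 18:
--             if lista[i][2] == 1:
--                 cont[0] += 1
--             elif lista[i][2] == 2:
--                 cont[1] += 1
--     return cont
-- ===== SOURCE B (Python) =====
-- def calMenores(lista):
--     # One independent counting pass per gender category: no mutable
--     # accumulator, no if/elif branching -- each result slot is the count
--     # of its own predicate over the list.
--     return [sum(1 for p in lista if p[1] < 18 and p[2] == g) for g in (1, 2)]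
-- ===== Notes on version B (the rewrite author's own statement) =====
-- stated objective: simpler
-- what changed: Replaces A's single pass with a mutable two-slot accumulator and if/elif branch increments by two independent per-gender counting passes (sum of a 0/1 predicate per category), eliminating mutable state and branching entirely.
import Mathlib
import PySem

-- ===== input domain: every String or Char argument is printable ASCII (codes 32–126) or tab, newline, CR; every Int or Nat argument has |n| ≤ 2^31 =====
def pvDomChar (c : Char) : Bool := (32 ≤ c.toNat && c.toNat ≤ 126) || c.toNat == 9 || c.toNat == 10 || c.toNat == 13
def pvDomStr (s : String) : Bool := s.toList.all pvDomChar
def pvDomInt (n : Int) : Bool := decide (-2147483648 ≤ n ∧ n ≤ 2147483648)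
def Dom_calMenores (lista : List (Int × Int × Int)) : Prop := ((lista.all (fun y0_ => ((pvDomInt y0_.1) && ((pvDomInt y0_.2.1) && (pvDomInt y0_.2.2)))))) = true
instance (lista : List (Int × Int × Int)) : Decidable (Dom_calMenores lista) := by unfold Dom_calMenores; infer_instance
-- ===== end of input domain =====

-- B replaces A's single pass with a mutable two-slot accumulator and if/elif branch
-- increments by two independent per-gender counting passes (simpler: no mutable state).

-- ===== PORT A =====
-- cont=[0,0]; for i in range(0,len(lista)): if lista[i][1]<18: if lista[i][2]==1: cont[0]+=1 elif lista[i][2]==2: cont[1]+=1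
def calMenores (lista : List (Int × Int × Int)) : List Int :=
  let cont :=
    (PySem.List.pyRange 0 lista.length 1).foldl
      (fun (c : Int × Int) i =>
        if (PySem.List.pyGetD lista i (0, 0, 0)).2.1 < 18 then
          if (PySem.List.pyGetD lista i (0, 0, 0)).2.2 = 1 then (c.1 + 1, c.2)
          else if (PySem.List.pyGetD lista i (0, 0, 0)).2.2 = 2 then (c.1, c.2 + 1)
          else c
        else c)
      (0, 0)
  [cont.1, cont.2]

-- ===== PORT B =====
-- return [sum(1 for p in lista if p[1] < 18 and p[2] == g) for g in (1, 2)]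
def calMenores_alt (lista : List (Int × Int × Int)) : List Int :=
  [(1 : Int), 2].map (fun g =>
    ((lista.filter (fun p => p.2.1 < 18 && p.2.2 == g)).map (fun _ => (1 : Int))).sum)

-- ===== PRECONDITION & SPEC =====
def Spec_calMenores (lista : List (Int × Int × Int)) (out : List Int) : Prop := out = calMenores_alt lista
instance (lista : List (Int × Int × Int)) (out : List Int) : Decidable (Spec_calMenores lista out) := by unfold Spec_calMenores; infer_instance

-- ===== CLAIM (what is proved, stated in full; the proofs are below) =====
def Claim_equal_calMenores : Prop := ∀ (lista : List (Int × Int × Int)), Dom_calMenores lista → Spec_calMenores lista (calMenores lista)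

-- ===== LEMMAS AND PROOFS =====

-- A's loop body, run over the whole list, adds to each slot the corresponding
-- per-gender 0/1 sum that B computes in its own pass.
theorem calMenores_foldl_eq (lista : List (Int × Int × Int)) (a b : Int) :
    lista.foldl
      (fun (c : Int × Int) t =>
        if t.2.1 < 18 then
          if t.2.2 = 1 then (c.1 + 1, c.2)
          else if t.2.2 = 2 then (c.1, c.2 + 1)
          else c
        else c)
      (a, b)
    = (a + ((lista.filter (fun p => p.2.1 < 18 && p.2.2 == (1 : Int))).map (fun _ => (1 : Int))).sum,
       b + ((lista.filter (fun p => p.2.1 < 18 && p.2.2 == (2 : Int))).map (fun _ => (1 : Int))).sum) := by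
  induction lista generalizing a b with
  | nil => simp
  | cons t rest ih =>
    by_cases h18 : t.2.1 < 18
    · by_cases h1 : t.2.2 = 1
      · simp [List.foldl_cons, h18, h1, ih]
        omega
      · by_cases h2 : t.2.2 = 2
        · simp [List.foldl_cons, h18, h2, ih]
          omega
        · simp [List.foldl_cons, h18, h1, h2, ih]
    · simp [List.foldl_cons, h18, ih]

-- ===== VERDICT (by name: the statement is the Claim_ definition above) =====
theorem calMenores_spec : Claim_equal_calMenores := by
  intro lista _
  unfold Spec_calMenores calMenores calMenores_alt
  rw [show ((lista.length : Int)) = (PySem.List.len lista) from (PySem.List.len_eq lista).symm]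
  rw [PySem.List.foldl_pyRange_zero_pyGetD lista ((0 : Int), (0 : Int), (0 : Int))
        (fun (c : Int × Int) t =>
          if t.2.1 < 18 then
            if t.2.2 = 1 then (c.1 + 1, c.2)
            else if t.2.2 = 2 then (c.1, c.2 + 1)
            else c
          else c)
        ((0 : Int), (0 : Int))]
  rw [calMenores_foldl_eq]
  simp
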